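-- pv_equiv track=rewrite | github.com/daniel-reich/ubiquitous-fiesta | g7sh7oLoArRLmM2ky_10.py | binary_to_decimal
-- ===== SOURCE A (Python) =====
-- def binary_to_decimal(s):
--   b = ''.join(['0' if i.isupper() else '1' for i in s][::-1])
--   if b == '11111':
--     return 27
--   elif b == '01111':
--     return 26
--   d = 0
--   for i in range(len(b)):
--     if b[i] == '1':
--       d += 2**i
--   return d
-- ===== SOURCE B (Python) =====
-- def binary_to_decimal(s):
--     d = 0
--     for c in s:
--         d = 2 * d + (0 if c.isupper() else 1)
--     if len(s) == 5 and d >= 30: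
--         return d - 4
--     return d
-- ===== Notes on version B (the rewrite author's own statement) =====
-- stated objective: simpler
-- what changed: B never builds or reverses a bit-string: it makes one Horner pass over s (d = 2*d + (0 if upper else 1)) and replaces A's two hard-coded reversed pattern checks by an arithmetic rule (length 5 and d >= 30 means return d - 4), since those two patterns are exactly the length-5 inputs whose Horner value is 31 or 30.
import Mathlib
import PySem

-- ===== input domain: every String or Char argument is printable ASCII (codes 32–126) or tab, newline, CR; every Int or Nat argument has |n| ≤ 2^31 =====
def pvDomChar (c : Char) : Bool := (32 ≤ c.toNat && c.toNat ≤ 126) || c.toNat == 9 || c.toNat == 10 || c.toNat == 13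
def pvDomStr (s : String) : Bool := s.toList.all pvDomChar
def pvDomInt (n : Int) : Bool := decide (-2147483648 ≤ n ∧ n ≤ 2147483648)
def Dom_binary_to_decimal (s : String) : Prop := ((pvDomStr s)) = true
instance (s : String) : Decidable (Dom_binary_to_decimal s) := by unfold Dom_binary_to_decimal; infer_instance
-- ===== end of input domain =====

-- B never builds or reverses a bit-string: one Horner pass over s plus an arithmetic
-- special case (length 5 and d >= 30 → d - 4) replacing A's hard-coded pattern checks.

-- ===== PORT A =====
def binary_to_decimal (s : String) : Int :=
  let b : List Char := (s.toList.map (fun i => if PySem.Chars.isupper i then '0' else '1')).reverse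
  if b = ['1','1','1','1','1'] then 27
  else if b = ['0','1','1','1','1'] then 26
  else (PySem.List.pyRange 0 (b.length : Int) 1).foldl
    (fun d i => if PySem.List.pyGetD b i ' ' = '1' then d + 2 ^ i.toNat else d) 0

-- ===== PORT B =====
def binary_to_decimal_alt (s : String) : Int :=
  let d : Int := s.toList.foldl (fun d c => 2 * d + (if PySem.Chars.isupper c then 0 else 1)) 0
  if s.toList.length = 5 ∧ 30 ≤ d then d - 4 else d

-- ===== PRECONDITION & SPEC =====
def Spec_binary_to_decimal (s : String) (out : Int) : Prop := out = binary_to_decimal_alt s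
instance (s : String) (out : Int) : Decidable (Spec_binary_to_decimal s out) := by unfold Spec_binary_to_decimal; infer_instance

-- ===== CLAIM (what is proved, stated in full; the proofs are below) =====
def Claim_equal_binary_to_decimal : Prop := ∀ (s : String), Dom_binary_to_decimal s → Spec_binary_to_decimal s (binary_to_decimal s)

-- ===== LEMMAS AND PROOFS =====

-- Horner fold with an arbitrary initial accumulator
theorem horner_init (t : List Char) (d : Int) :
    t.foldl (fun d c => d * 2 + (if c = '1' then 1 else 0)) d
      = d * 2 ^ t.length + t.foldl (fun d c => d * 2 + (if c = '1' then 1 else 0)) 0 := by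
  induction t generalizing d with
  | nil => simp
  | cons c t ih =>
    simp only [List.foldl_cons, List.length_cons]
    rw [ih, ih (0 * 2 + _)]
    ring

-- A's index-weighted sum over bs equals the Horner fold over bs.reverse
theorem loop_eq (bs : List Char) :
    (PySem.List.pyRange 0 (bs.length : Int) 1).foldl
      (fun d i => if PySem.List.pyGetD bs i ' ' = '1' then d + 2 ^ i.toNat else d) (0 : Int)
      = bs.reverse.foldl (fun d c => d * 2 + (if c = '1' then 1 else 0)) (0 : Int) := by
  induction bs using List.reverseRecOn with
  | nil => simp [PySem.List.pyRange]
  | append_singleton bs c ih =>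
    have hlen : ((bs ++ [c]).length : Int) = (bs.length : Int) + 1 := by simp
    rw [hlen, PySem.List.pyRange_one_succ_right (by positivity), List.foldl_append]
    have hcongr :
        (PySem.List.pyRange 0 (bs.length : Int) 1).foldl
          (fun d i => if PySem.List.pyGetD (bs ++ [c]) i ' ' = '1' then d + 2 ^ i.toNat else d) (0 : Int)
        = (PySem.List.pyRange 0 (bs.length : Int) 1).foldl
          (fun d i => if PySem.List.pyGetD bs i ' ' = '1' then d + 2 ^ i.toNat else d) (0 : Int) := by
      apply PySem.List.foldl_congr_mem
      intro a i hi
      rw [PySem.List.mem_pyRange_one] at hi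
      rw [PySem.List.pyGetD_eq_getElem (bs ++ [c]) ' ' (by omega) (by simp; omega),
          PySem.List.pyGetD_eq_getElem bs ' ' (by omega) (by omega),
          List.getElem_append_left]
    have hget : PySem.List.pyGetD (bs ++ [c]) ((bs.length : Int)) ' ' = c := by
      rw [PySem.List.pyGetD_eq_getElem (bs ++ [c]) ' ' (by positivity) (by simp)]
      simp
    simp only [List.foldl_cons, List.foldl_nil, hget,
      List.reverse_append, List.reverse_singleton, List.singleton_append,
      Int.toNat_natCast]
    rw [horner_init bs.reverse (0 * 2 + if c = '1' then 1 else 0), List.length_reverse]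
    split_ifs <;> rw [hcongr, ih] <;> ring

-- B's direct fold over the characters equals the Horner fold over the mapped bit list
theorem fold_map_eq (cs : List Char) (d : Int) :
    cs.foldl (fun d c => 2 * d + (if PySem.Chars.isupper c then 0 else 1)) d
      = (cs.map (fun i => if PySem.Chars.isupper i then '0' else '1')).foldl
          (fun d c => d * 2 + (if c = '1' then 1 else 0)) d := by
  induction cs generalizing d with
  | nil => simp
  | cons c cs ih =>
    simp only [List.foldl_cons, List.map_cons]
    rw [ih]
    congr 1
    by_cases h : PySem.Chars.isupper c <;> simp [h] <;> ring

-- ===== VERDICT (by name: the statement is the Claim_ definition above) =====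
theorem binary_to_decimal_spec : Claim_equal_binary_to_decimal := by
  intro s _
  unfold Spec_binary_to_decimal binary_to_decimal binary_to_decimal_alt
  set cs := s.toList with hcs
  set m := cs.map (fun i => if PySem.Chars.isupper i then '0' else '1') with hm
  have hmlen : m.length = cs.length := by simp [hm]
  have hd : cs.foldl (fun d c => 2 * d + (if PySem.Chars.isupper c then 0 else 1)) (0 : Int)
      = m.foldl (fun d c => d * 2 + (if c = '1' then 1 else 0)) (0 : Int) := fold_map_eq cs 0
  have hloop := loop_eq m.reverse
  rw [List.reverse_reverse] at hloop
  by_cases hlen : cs.length = 5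
  · -- length-5 case: destructure into five characters and split on the five bits
    rcases cs with _ | ⟨a, cs⟩; · simp at hlen
    rcases cs with _ | ⟨b, cs⟩; · simp at hlen
    rcases cs with _ | ⟨c, cs⟩; · simp at hlen
    rcases cs with _ | ⟨e, cs⟩; · simp at hlen
    rcases cs with _ | ⟨f, cs⟩; · simp at hlen
    rcases cs with _ | ⟨g, cs⟩
    · simp only [hm] at hloop hd ⊢
      rw [hloop, hd]
      by_cases h1 : PySem.Chars.isupper a <;>
        by_cases h2 : PySem.Chars.isupper b <;>
          by_cases h3 : PySem.Chars.isupper c <;>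
            by_cases h4 : PySem.Chars.isupper e <;>
              by_cases h5 : PySem.Chars.isupper f <;>
                simp [h1, h2, h3, h4, h5]
    · simp at hlen
  · -- length ≠ 5: no special case fires on either side
    have hA1 : ¬ m.reverse = ['1','1','1','1','1'] := by
      intro h; apply hlen
      have := congrArg List.length h; simpa [hmlen] using this
    have hA2 : ¬ m.reverse = ['0','1','1','1','1'] := by
      intro h; apply hlen
      have := congrArg List.length h; simpa [hmlen] using this
    rw [if_neg hA1, if_neg hA2, if_neg (by simp [hlen]), hloop, hd]
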